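-- pv_equiv track=rewrite | github.com/hon3538/KT_AIVLE | Algorithm/[실패]전개도자르기.py | turn_block
-- ===== SOURCE A (Python) =====
-- def turn_block(figure):  # 반시계방향으로
--     h = len(figure)
--     w = len(figure[0])
--
--     new_figure = [['']*h for _ in range(w)]
--     for y in range(h):
--         for x in range(w):
--             new_figure[w-x-1][y] = figure[y][x]
--     return new_figure
-- ===== SOURCE B (Python) =====
-- def turn_block(figure):  # counterclockwise rotation = transpose by peeling columns, then reverse
--     w = len(figure[0])
--     rows = [list(r) for r in figure]   # working copies; input is not mutated
--     out = []
--     for _ in range(w):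
--         out.append([r.pop(0) for r in rows])  # consume the current leftmost column
--     out.reverse()
--     return out
-- ===== Notes on version B (the rewrite author's own statement) =====
-- stated objective: alternative
-- what changed: B computes the rotation as reverse-of-transpose: it destructively peels the leftmost column off working copies of the rows w times, collecting the columns in order, and reverses the collected list at the end, instead of preallocating a w-by-h grid and scatter-writing each cell by index arithmetic.
import Mathlib
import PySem

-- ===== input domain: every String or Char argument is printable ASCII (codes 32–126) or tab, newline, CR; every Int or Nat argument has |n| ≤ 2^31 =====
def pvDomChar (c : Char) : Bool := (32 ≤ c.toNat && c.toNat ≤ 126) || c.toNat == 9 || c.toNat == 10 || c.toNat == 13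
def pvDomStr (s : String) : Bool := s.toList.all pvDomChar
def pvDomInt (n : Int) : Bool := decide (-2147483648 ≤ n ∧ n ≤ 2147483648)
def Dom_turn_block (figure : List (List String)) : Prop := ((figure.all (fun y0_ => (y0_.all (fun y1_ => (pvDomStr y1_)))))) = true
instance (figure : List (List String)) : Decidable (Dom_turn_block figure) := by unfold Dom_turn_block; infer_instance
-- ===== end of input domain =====

-- B computes the rotation as reverse-of-transpose, peeling the leftmost column off
-- working copies of the rows w times and reversing the collected columns, instead of
-- A's preallocated grid with index-arithmetic scatter-writes (objective: alternative).

-- ===== PORT A =====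
-- one scatter-write step of A's inner loop: new_figure[w-x-1][y] = figure[y][x]
def turnStepA (figure : List (List String)) (w y : Nat) (nf : List (List String)) (x : Nat) : List (List String) :=
  nf.set (w - 1 - x) ((nf.getD (w - 1 - x) []).set y ((figure.getD y []).getD x ""))

def turn_block (figure : List (List String)) : List (List String) :=
  let h := figure.length
  let w := (figure.headD []).length
  let nf0 := (List.range w).map (fun _ => List.replicate h "")
  (List.range h).foldl (fun nf y => (List.range w).foldl (turnStepA figure w y) nf) nf0

-- ===== PORT B =====
-- one iteration of B's loop: append the current leftmost column, drop it from every row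
def peelStep (st : List (List String) × List (List String)) (_i : Nat) :
    List (List String) × List (List String) :=
  (st.1 ++ [st.2.map (fun r => r.headD "")], st.2.map List.tail)

def turn_block_alt (figure : List (List String)) : List (List String) :=
  let w := (figure.headD []).length
  let res := (List.range w).foldl peelStep ([], figure)
  res.1.reverse

-- ===== PRECONDITION & SPEC =====
-- Pre_ excludes exactly the inputs on which Python A raises an IndexError:
-- the empty figure (figure[0]) and ragged figures whose later rows are shorter than row 0.
def Pre_turn_block (figure : List (List String)) : Prop :=
  figure ≠ [] ∧ ∀ row ∈ figure, (figure.headD []).length ≤ row.length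
instance (figure : List (List String)) : Decidable (Pre_turn_block figure) := by unfold Pre_turn_block; infer_instance
def pvWitness_turn_block : List (List String) := [["a", "b"], ["c", "d"], ["e", "f"]]

def Spec_turn_block (figure : List (List String)) (out : List (List String)) : Prop := out = turn_block_alt figure
instance (figure : List (List String)) (out : List (List String)) : Decidable (Spec_turn_block figure out) := by unfold Spec_turn_block; infer_instance

-- ===== CLAIM (what is proved, stated in full; the proofs are below) =====
def Claim_equal_turn_block : Prop := ∀ (figure : List (List String)), Dom_turn_block figure → Pre_turn_block figure → Spec_turn_block figure (turn_block figure)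

-- ===== LEMMAS AND PROOFS =====

theorem turnStepA_length (figure : List (List String)) (w y : Nat) (nf : List (List String)) (x : Nat) :
    (turnStepA figure w y nf x).length = nf.length := by
  simp [turnStepA]

theorem innerA_length (figure : List (List String)) (w y : Nat) (L : List Nat) (nf : List (List String)) :
    (L.foldl (turnStepA figure w y) nf).length = nf.length := by
  induction L generalizing nf with
  | nil => rfl
  | cons x L ih => simp [List.foldl_cons, ih, turnStepA_length]

-- pointwise effect of the inner loop over a duplicate-free list of column indices < w
theorem innerA_getD (figure : List (List String)) (w y : Nat) (L : List Nat)
    (hw : ∀ x ∈ L, x < w) (hnd : L.Nodup) (nf : List (List String)) (hlen : nf.length = w)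
    (i : Nat) (hi : i < w) :
    (L.foldl (turnStepA figure w y) nf).getD i [] =
      if w - 1 - i ∈ L then (nf.getD i []).set y ((figure.getD y []).getD (w - 1 - i) "")
      else nf.getD i [] := by
  induction L generalizing nf with
  | nil => simp
  | cons x L ih =>
    have hxw : x < w := hw x (by simp)
    have hnd' : L.Nodup := hnd.of_cons
    have hxL : x ∉ L := by simp at hnd; exact hnd.1
    have hlen' : (turnStepA figure w y nf x).length = w := by rw [turnStepA_length, hlen]
    rw [List.foldl_cons, ih (fun z hz => hw z (by simp [hz])) hnd' _ hlen']
    by_cases hix : i = w - 1 - x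
    · have hx : x = w - 1 - i := by omega
      have hmem : w - 1 - i ∉ L := by rw [← hx]; exact hxL
      have hmem2 : w - 1 - i ∈ x :: L := by simp [hx]
      simp only [hmem, if_false, hmem2, if_true]
      have : (turnStepA figure w y nf x).getD i [] =
          (nf.getD i []).set y ((figure.getD y []).getD x "") := by
        unfold turnStepA
        rw [← hix]
        rw [List.getD, List.getElem?_set_self (by omega : i < nf.length)]
        simp [hix]
      rw [this, ← hx]
    · have hrow : (turnStepA figure w y nf x)[i]?.getD [] = nf[i]?.getD [] := by
        unfold turnStepA
        rw [List.getElem?_set_ne (by omega)]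
      by_cases hmem : w - 1 - i ∈ L
      · simp only [hmem, if_true, List.getD]
        rw [hrow]
        simp [hmem]
      · have hm2 : w - 1 - i ∉ x :: L := by
          simp only [List.mem_cons, not_or]
          exact ⟨by omega, hmem⟩
        simp only [hmem, hm2, if_false, List.getD]
        rw [hrow]

-- pointwise effect of a fold that sets position y of a row for each y in L
theorem setFold_getElem? (g : Nat → String) (L : List Nat) (r0 : List String) (j : Nat) :
    (L.foldl (fun r y => r.set y (g y)) r0)[j]? =
      if j ∈ L ∧ j < r0.length then some (g j) else r0[j]? := by
  induction L generalizing r0 with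
  | nil => simp
  | cons y L ih =>
    rw [List.foldl_cons, ih]
    by_cases hjy : j = y
    · subst hjy
      by_cases hj : j < r0.length
      · simp [hj]
      · have : r0[j]? = none := by
          rw [List.getElem?_eq_none_iff]; omega
        simp [hj]
    · by_cases hm : j ∈ L
      · simp [hm, hjy, List.getElem?_set_ne (Ne.symm hjy)]
      · simp [hm, hjy, List.getElem?_set_ne (Ne.symm hjy)]

-- row i of the outer fold, as a fold over rows of the single row i
theorem outerA_getD (figure : List (List String)) (w : Nat) (L : List Nat)
    (nf : List (List String)) (hlen : nf.length = w) (i : Nat) (hi : i < w) :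
    (L.foldl (fun nf y => (List.range w).foldl (turnStepA figure w y) nf) nf).getD i [] =
      L.foldl (fun r y => r.set y ((figure.getD y []).getD (w - 1 - i) "")) (nf.getD i []) := by
  induction L generalizing nf with
  | nil => rfl
  | cons y L ih =>
    rw [List.foldl_cons, List.foldl_cons]
    have hlen' : ((List.range w).foldl (turnStepA figure w y) nf).length = w := by
      rw [innerA_length, hlen]
    rw [ih _ hlen']
    congr 1
    rw [innerA_getD figure w y (List.range w) (fun x hx => List.mem_range.mp hx)
        (List.nodup_range) nf hlen i hi]
    have : w - 1 - i ∈ List.range w := List.mem_range.mpr (by omega)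
    simp [this]

theorem turn_block_getD (figure : List (List String)) (i : Nat)
    (hi : i < (figure.headD []).length) :
    (turn_block figure).getD i [] =
      (List.range figure.length).map
        (fun j => (figure.getD j []).getD ((figure.headD []).length - 1 - i) "") := by
  unfold turn_block
  simp only []
  set h := figure.length
  set w := (figure.headD []).length
  have hlen0 : ((List.range w).map (fun _ => List.replicate h "")).length = w := by simp
  rw [outerA_getD figure w (List.range h) _ hlen0 i hi]
  have hrow0 : ((List.range w).map (fun _ => List.replicate h ("" : String))).getD i [] =
      List.replicate h "" := by
    rw [List.getD, List.getElem?_map, List.getElem?_range hi]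
    rfl
  rw [hrow0]
  apply List.ext_getElem?
  intro j
  rw [setFold_getElem? _ (List.range h) (List.replicate h "") j]
  by_cases hj : j < h
  · simp [hj]
  · have h1 : (List.replicate h ("" : String))[j]? = none := by
      rw [List.getElem?_eq_none_iff]; simpa using hj
    have h2 : ((List.range h).map
        (fun j => (figure.getD j []).getD (w - 1 - i) ""))[j]? = none := by
      rw [List.getElem?_eq_none_iff]; simpa using hj
    simp [hj]

theorem outerA_length (figure : List (List String)) (w : Nat) (L : List Nat)
    (nf : List (List String)) :
    (L.foldl (fun nf y => (List.range w).foldl (turnStepA figure w y) nf) nf).length = nf.length := by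
  induction L generalizing nf with
  | nil => rfl
  | cons y L ih => rw [List.foldl_cons, ih, innerA_length]

theorem turn_block_length (figure : List (List String)) :
    (turn_block figure).length = (figure.headD []).length := by
  unfold turn_block
  simp only []
  rw [outerA_length]
  simp

-- ===== B-side lemmas =====

theorem getD_tail (r : List String) (t : Nat) : r.tail.getD t "" = r.getD (t + 1) "" := by
  simp [List.getD, List.getElem?_tail]

-- the peel fold collects exactly the first L.length columns in order
theorem peelFold (L : List Nat) (o rs : List (List String)) :
    L.foldl peelStep (o, rs) =
      (o ++ (List.range L.length).map (fun t => rs.map (fun r => r.getD t "")),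
       rs.map (List.drop L.length)) := by
  induction L generalizing o rs with
  | nil =>
    simp only [List.foldl_nil, List.length_nil, List.range_zero, List.map_nil, List.append_nil]
    rw [show (List.drop 0 : List String → List String) = id from funext fun r => List.drop_zero]
    simp
  | cons x L ih =>
    rw [List.foldl_cons]
    show L.foldl peelStep (o ++ [rs.map (fun r => r.headD "")], rs.map List.tail) = _
    rw [ih]
    simp only [Prod.mk.injEq]
    refine ⟨?_, ?_⟩
    · rw [List.append_assoc]
      congr 1
      rw [List.length_cons, List.range_succ_eq_map, List.map_cons, List.map_map]
      simp only [List.singleton_append]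
      congr 1
      · refine List.map_congr_left (fun r _ => ?_)
        cases r <;> simp [List.getD]
      · refine List.map_congr_left (fun t _ => ?_)
        simp only [Function.comp_apply, List.map_map]
        refine List.map_congr_left (fun r _ => ?_)
        exact (getD_tail r t).trans rfl
    · rw [List.map_map]
      refine List.map_congr_left (fun r _ => ?_)
      show (r.tail).drop L.length = r.drop (x :: L).length
      rw [List.length_cons, ← List.drop_one, List.drop_drop, Nat.add_comm]

theorem turn_block_alt_eq (figure : List (List String)) :
    turn_block_alt figure =
      ((List.range (figure.headD []).length).map
        (fun t => figure.map (fun r => r.getD t ""))).reverse := by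
  unfold turn_block_alt
  simp only []
  rw [peelFold]
  simp

-- map over row indices equals map over the rows themselves
theorem map_range_getD (figure : List (List String)) (c : Nat) :
    (List.range figure.length).map (fun j => (figure.getD j []).getD c "") =
      figure.map (fun r => r.getD c "") := by
  apply List.ext_getElem
  · simp
  · intro j h1 h2
    simp only [List.getElem_map, List.getElem_range]
    have hj : j < figure.length := by simpa using h2
    simp [List.getD, List.getElem?_eq_getElem hj]

-- ===== VERDICT (by name: the statement is the Claim_ definition above) =====
theorem turn_block_spec : Claim_equal_turn_block := by
  intro figure _ _
  unfold Spec_turn_block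
  rw [turn_block_alt_eq]
  set w := (figure.headD []).length with hw
  apply List.ext_getElem
  · rw [turn_block_length]; simp [List.headD, hw]
  · intro i hi1 hi2
    have hiw : i < w := by rw [turn_block_length] at hi1; exact hi1
    have hrow := turn_block_getD figure i hiw
    rw [List.getD, List.getElem?_eq_getElem hi1, Option.getD_some] at hrow
    rw [hrow, map_range_getD, List.getElem_reverse]
    simp [List.headD_eq_head?_getD]
    intro a _
    rw [← List.headD_eq_head?_getD, ← hw]
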